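-- pv_equiv track=rewrite | github.com/luisrnandezc/performance-cessna-172 | src/data.py | valid_cruise_press_alt_1000
-- ===== SOURCE A (Python) =====
-- def valid_cruise_press_alt_1000(cruise_press_alt):
--     """Returns the corrected pressure altitude required
--      for climb performance computation.
--     """
--     valid_altitudes = list(range(0, 13000, 1000))
--     max_alt = valid_altitudes[-1]
--     if cruise_press_alt > max_alt:
--         return max_alt
--     else:
--         for valid_alt in valid_altitudes:
--             if cruise_press_alt == valid_alt:
--                 return valid_alt
--             elif cruise_press_alt >= valid_alt + 250:
--                 continue
--             else:
--                 return valid_alt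
-- ===== SOURCE B (Python) =====
-- def valid_cruise_press_alt_1000(cruise_press_alt):
--     """Returns the corrected pressure altitude required
--      for climb performance computation.
--     """
--     if cruise_press_alt > 12000:
--         return 12000
--     if cruise_press_alt < 250:
--         return 0
--     return int(((cruise_press_alt + 750) // 1000) * 1000)
-- ===== Notes on version B (the rewrite author's own statement) =====
-- stated objective: simpler
-- what changed: Replaces the scan over the fixed list of altitude levels with a closed-form rounding formula (clamp, then ((alt+750)//1000)*1000).
import Mathlib
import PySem

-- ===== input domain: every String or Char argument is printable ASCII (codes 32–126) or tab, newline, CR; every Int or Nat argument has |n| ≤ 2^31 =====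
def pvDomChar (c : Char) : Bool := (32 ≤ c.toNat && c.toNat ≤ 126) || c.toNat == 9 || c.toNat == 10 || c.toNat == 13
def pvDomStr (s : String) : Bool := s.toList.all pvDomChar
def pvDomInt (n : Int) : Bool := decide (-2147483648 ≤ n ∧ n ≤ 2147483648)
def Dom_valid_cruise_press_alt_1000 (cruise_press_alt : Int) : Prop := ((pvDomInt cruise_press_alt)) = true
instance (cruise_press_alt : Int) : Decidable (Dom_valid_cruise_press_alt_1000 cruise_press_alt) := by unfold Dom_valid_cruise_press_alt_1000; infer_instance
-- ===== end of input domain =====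

-- B: closed-form rounding (clamp then ((alt+750)//1000)*1000) instead of scanning the fixed level list; simpler.


-- ===== PORT A =====
-- valid_altitudes = list(range(0, 13000, 1000)); max_alt = valid_altitudes[-1]
-- the for-loop over valid_altitudes, returning as A does; loopA [] = 0 is the
-- unreachable fall-off-the-end case (Python would return None; the loop always
-- returns because it is only entered with cruise_press_alt <= 12000)
def loopA (cruise_press_alt : Int) : List Int → Int
  | [] => 0
  | valid_alt :: rest =>
    if cruise_press_alt = valid_alt then valid_alt
    else if cruise_press_alt ≥ valid_alt + 250 then loopA cruise_press_alt rest
    else valid_alt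

def valid_cruise_press_alt_1000 (cruise_press_alt : Int) : Int :=
  let valid_altitudes := PySem.List.pyRange 0 13000 1000
  let max_alt := (PySem.List.pyGet? valid_altitudes (-1)).getD 0  -- list is nonempty, getD never hits the default
  if cruise_press_alt > max_alt then max_alt
  else loopA cruise_press_alt valid_altitudes

-- ===== PORT B =====
def valid_cruise_press_alt_1000_alt (cruise_press_alt : Int) : Int :=
  if cruise_press_alt > 12000 then 12000
  else if cruise_press_alt < 250 then 0
  else PySem.Int.floordiv (cruise_press_alt + 750) 1000 * 1000

-- ===== PRECONDITION & SPEC =====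
def Spec_valid_cruise_press_alt_1000 (cruise_press_alt : Int) (out : Int) : Prop := out = valid_cruise_press_alt_1000_alt cruise_press_alt
instance (cruise_press_alt : Int) (out : Int) : Decidable (Spec_valid_cruise_press_alt_1000 cruise_press_alt out) := by unfold Spec_valid_cruise_press_alt_1000; infer_instance

-- ===== CLAIM (what is proved, stated in full; the proofs are below) =====
def Claim_equal_valid_cruise_press_alt_1000 : Prop := ∀ (cruise_press_alt : Int), Dom_valid_cruise_press_alt_1000 cruise_press_alt → Spec_valid_cruise_press_alt_1000 cruise_press_alt (valid_cruise_press_alt_1000 cruise_press_alt)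

-- ===== LEMMAS AND PROOFS =====
theorem loopA_low {c a : Int} {rest : List Int} (h : c < a + 250) : loopA c (a :: rest) = a := by
  show (if c = a then a else if c ≥ a + 250 then loopA c rest else a) = a
  split_ifs <;> omega

theorem loopA_high {c a : Int} {rest : List Int} (h : a + 250 ≤ c) :
    loopA c (a :: rest) = loopA c rest := by
  show (if c = a then a else if c ≥ a + 250 then loopA c rest else a) = loopA c rest
  rw [if_neg (by omega), if_pos (by omega)]

theorem A_unfold (c : Int) : valid_cruise_press_alt_1000 c =
    if c > 12000 then 12000
    else loopA c [0, 1000, 2000, 3000, 4000, 5000, 6000, 7000, 8000, 9000, 10000, 11000, 12000] := by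
  unfold valid_cruise_press_alt_1000
  rw [show PySem.List.pyRange 0 13000 1000 =
      [(0:Int), 1000, 2000, 3000, 4000, 5000, 6000, 7000, 8000, 9000,  10000, 11000, 12000] from by decide]
  rfl

theorem main_eval (c : Int) (h : ¬ c > 12000) :
    loopA c [0, 1000, 2000, 3000, 4000, 5000, 6000, 7000, 8000, 9000, 10000, 11000, 12000] =
    (if c < 250 then 0 else (c + 750) / 1000 * 1000) := by
  by_cases h0 : c < 250
  · rw [loopA_low (by omega)]; (split_ifs <;> omega)
  rw [loopA_high (by omega)]
  by_cases h1000 : c < 1250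
  · rw [loopA_low (by omega)]; (split_ifs <;> omega)
  rw [loopA_high (by omega)]
  by_cases h2000 : c < 2250
  · rw [loopA_low (by omega)]; (split_ifs <;> omega)
  rw [loopA_high (by omega)]
  by_cases h3000 : c < 3250
  · rw [loopA_low (by omega)]; (split_ifs <;> omega)
  rw [loopA_high (by omega)]
  by_cases h4000 : c < 4250
  · rw [loopA_low (by omega)]; (split_ifs <;> omega)
  rw [loopA_high (by omega)]
  by_cases h5000 : c < 5250
  · rw [loopA_low (by omega)]; (split_ifs <;> omega)
  rw [loopA_high (by omega)]
  by_cases h6000 : c < 6250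
  · rw [loopA_low (by omega)]; (split_ifs <;> omega)
  rw [loopA_high (by omega)]
  by_cases h7000 : c < 7250
  · rw [loopA_low (by omega)]; (split_ifs <;> omega)
  rw [loopA_high (by omega)]
  by_cases h8000 : c < 8250
  · rw [loopA_low (by omega)]; (split_ifs <;> omega)
  rw [loopA_high (by omega)]
  by_cases h9000 : c < 9250
  · rw [loopA_low (by omega)]; (split_ifs <;> omega)
  rw [loopA_high (by omega)]
  by_cases h10000 : c < 10250
  · rw [loopA_low (by omega)]; (split_ifs <;> omega)
  rw [loopA_high (by omega)]
  by_cases h11000 : c < 11250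
  · rw [loopA_low (by omega)]; (split_ifs <;> omega)
  rw [loopA_high (by omega)]
  rw [loopA_low (by omega)]; (split_ifs <;> omega)

-- ===== VERDICT (by name: the statement is the Claim_ definition above) =====
theorem valid_cruise_press_alt_1000_spec : Claim_equal_valid_cruise_press_alt_1000 := by
  intro c _
  unfold Spec_valid_cruise_press_alt_1000 valid_cruise_press_alt_1000_alt
  rw [A_unfold]
  by_cases hb : c > 12000
  · rw [if_pos hb, if_pos hb]
  · rw [if_neg hb, if_neg hb, main_eval c hb]
    by_cases hc : c < 250
    · rw [if_pos hc, if_pos hc]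
    · rw [if_neg hc, if_neg hc, PySem.Int.floordiv_eq_ediv_of_pos (by omega)]
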